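-- pv_equiv track=rewrite | github.com/LaimeJesus/PCA | PCA.py | Extent
-- ===== SOURCE A (Python) =====
-- def Extent(S,context):
--     R = set([])
--     for o in range(context[1]):
--         add = True
--         for a in S:
--             if [o,a] not in context[0]:
--                 add = False
--         if add:
--             R.add(o)
--     return R
-- ===== SOURCE B (Python) =====
-- def Extent(S, context):
--     R = set(range(context[1]))
--     for a in S:
--         objs = {p[0] for p in context[0] if len(p) == 2 and p[1] == a}
--         R &= objs
--     return R
-- ===== Notes on version B (the rewrite author's own statement) =====
-- stated objective: faster
-- what changed: B seeds the result with all objects in range and intersects it with one hashed per-attribute object set per attribute, instead of scanning every object and testing each (o,a) pair by linear list membership.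
import Mathlib
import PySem

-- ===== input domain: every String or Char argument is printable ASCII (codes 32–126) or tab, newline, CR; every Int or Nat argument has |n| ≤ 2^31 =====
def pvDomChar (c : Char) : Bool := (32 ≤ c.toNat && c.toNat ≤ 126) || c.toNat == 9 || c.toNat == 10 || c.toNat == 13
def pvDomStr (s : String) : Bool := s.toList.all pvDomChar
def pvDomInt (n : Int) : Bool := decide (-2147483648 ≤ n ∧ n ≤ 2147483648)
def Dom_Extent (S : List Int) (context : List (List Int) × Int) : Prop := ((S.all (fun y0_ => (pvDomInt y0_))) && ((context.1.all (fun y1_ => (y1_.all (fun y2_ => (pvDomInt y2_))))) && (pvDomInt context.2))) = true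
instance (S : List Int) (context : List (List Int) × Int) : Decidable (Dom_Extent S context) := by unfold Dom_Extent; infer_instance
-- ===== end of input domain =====

-- B intersects per-attribute object sets starting from all objects in range, instead of
-- testing every (object, attribute) pair by list membership; same result, alternative algorithm.

-- ===== PORT A =====
def Extent (S : List Int) (context : List (List Int) × Int) : List Int :=
  (PySem.List.pyRange 0 context.2 1).foldl (fun R o =>
    let add := S.foldl (fun add a => if [o, a] ∈ context.1 then add else false) true
    if add then PySem.Set.add R o else R) PySem.Set.empty

-- ===== PORT B =====
def Extent_alt (S : List Int) (context : List (List Int) × Int) : List Int :=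
  S.foldl (fun R a =>
    PySem.Set.inter R (PySem.Set.ofList
      ((context.1.filter (fun p => p.length == 2 && PySem.List.pyGetD p 1 0 == a)).map
        (fun p => PySem.List.pyGetD p 0 0))))
    (PySem.Set.ofList (PySem.List.pyRange 0 context.2 1))

-- ===== PRECONDITION & SPEC =====
def Spec_Extent (S : List Int) (context : List (List Int) × Int) (out : List Int) : Prop := out = Extent_alt S context
instance (S : List Int) (context : List (List Int) × Int) (out : List Int) : Decidable (Spec_Extent S context out) := by unfold Spec_Extent; infer_instance

-- ===== CLAIM (what is proved, stated in full; the proofs are below) =====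
def Claim_equal_Extent : Prop := ∀ (S : List Int) (context : List (List Int) × Int), Dom_Extent S context → Spec_Extent S context (Extent S context)

-- ===== LEMMAS AND PROOFS =====

-- A's inner loop computes the conjunction over S
theorem foldl_and_all (S : List Int) (c : Int → Prop) [DecidablePred c] (b : Bool) :
    S.foldl (fun add a => if c a then add else false) b
      = (b && S.all (fun a => decide (c a))) := by
  induction S generalizing b with
  | nil => simp
  | cons a S ih =>
    simp only [List.foldl_cons, List.all_cons, ih]
    by_cases h : c a <;> simp [h]

-- A's outer loop: conditional Set.add over a nodup list starting from a disjoint accumulator is append-filter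
theorem foldl_add_filter (P : Int → Bool) (l acc : List Int) (hl : l.Nodup)
    (hd : ∀ x ∈ acc, x ∉ l) :
    l.foldl (fun R o => if P o then PySem.Set.add R o else R) acc = acc ++ l.filter P := by
  induction l generalizing acc with
  | nil => simp
  | cons o l ih =>
    have ho : o ∉ acc := fun h => hd o h (List.mem_cons_self)
    have hadd : PySem.Set.add acc o = acc ++ [o] := by
      simp [PySem.Set.add, PySem.Set.contains, ho]
    rw [List.foldl_cons]
    rcases List.nodup_cons.mp hl with ⟨hol, hl'⟩
    by_cases h : P o = true
    · rw [if_pos h, hadd, ih _ hl'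
        (by intro x hx; rcases List.mem_append.mp hx with h1 | h1
            · exact fun hm => hd x h1 (List.mem_cons_of_mem _ hm)
            · simp at h1; subst h1; exact hol)]
      simp [h]
    · rw [if_neg h, ih _ hl'
        (fun x hx hm => hd x hx (List.mem_cons_of_mem _ hm))]
      simp [h]

-- B's loop: iterated intersection is a filter by the conjunction
theorem foldl_inter_filter (S : List Int) (q : Int → Int → Bool) (l : List Int) :
    S.foldl (fun R a => R.filter (fun o => q a o)) l
      = l.filter (fun o => S.all (fun a => q a o)) := by
  induction S generalizing l with
  | nil => simp
  | cons a S ih =>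
    simp only [List.foldl_cons, ih, List.filter_filter, List.all_cons]
    exact List.filter_congr (fun x _ => Bool.and_comm _ _)

-- membership in B's per-attribute object set is exactly A's pair-membership test
theorem mem_objs_iff (context1 : List (List Int)) (a o : Int) :
    (o ∈ PySem.Set.ofList
      ((context1.filter (fun p => p.length == 2 && PySem.List.pyGetD p 1 0 == a)).map
        (fun p => PySem.List.pyGetD p 0 0))) ↔ [o, a] ∈ context1 := by
  rw [PySem.Set.mem_ofList]
  constructor
  · intro h
    rcases List.mem_map.mp h with ⟨p, hp, hpo⟩
    rcases List.mem_filter.mp hp with ⟨hpm, hcond⟩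
    simp only [Bool.and_eq_true, beq_iff_eq] at hcond
    match p, hcond.1 with
    | [x, y], _ =>
      have hy : y = a := by simpa [PySem.List.pyGetD, PySem.List.pyGet?, PySem.List.pyIdx?] using hcond.2
      have hx : x = o := by simpa [PySem.List.pyGetD, PySem.List.pyGet?, PySem.List.pyIdx?] using hpo
      subst hy; subst hx; exact hpm
  · intro h
    refine List.mem_map.mpr ⟨[o, a], List.mem_filter.mpr ⟨h, ?_⟩, ?_⟩
    · simp [PySem.List.pyGetD, PySem.List.pyGet?, PySem.List.pyIdx?]
    · simp [PySem.List.pyGetD, PySem.List.pyGet?, PySem.List.pyIdx?]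

-- ===== VERDICT (by name: the statement is the Claim_ definition above) =====
theorem Extent_spec : Claim_equal_Extent := by
  intro S context _
  show Extent S context = Extent_alt S context
  unfold Extent Extent_alt
  -- A side
  simp only [foldl_and_all, Bool.true_and]
  have hA := foldl_add_filter (fun o => S.all (fun a => decide ([o, a] ∈ context.1)))
      (PySem.List.pyRange 0 context.2 1) [] (PySem.List.nodup_pyRange_one 0 context.2)
      (by intro x hx; simp at hx)
  simp only [List.nil_append] at hA
  rw [show PySem.Set.empty = ([] : List Int) from rfl, hA]
  -- B side
  simp only [PySem.Set.inter]
  rw [PySem.Set.ofList_eq_self_of_nodup _ (PySem.List.nodup_pyRange_one 0 context.2)]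
  rw [foldl_inter_filter S (fun a o => PySem.Set.contains
      (PySem.Set.ofList
        ((context.1.filter (fun p => p.length == 2 && PySem.List.pyGetD p 1 0 == a)).map
          (fun p => PySem.List.pyGetD p 0 0))) o)]
  apply List.filter_congr
  intro o _
  apply congrArg
  funext a
  simp only [PySem.Set.contains, List.contains_eq_mem, decide_eq_decide]
  exact (mem_objs_iff context.1 a o).symm
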